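-- pv_equiv track=rewrite | github.com/EvgeniyZo/buh | mine_sum.py | find_equal_sums
-- ===== SOURCE A (Python) =====
-- import itertools,csv
--
-- def find_equal_sums(d,c,other):
--     solved_list = []
--     ds = sum(d)
--     cs = sum(c)
--     a = itertools.product([0,1],repeat=len(other))
--     for i in a:
--         ds2=ds
--         cs2=cs
--         for n,j in enumerate(i):
--             if j ==0:
--                 ds2+=other[n]
--             else:
--                 cs2+=other[n]
--         if ds2 == cs2:
--             solved_list.append(list(i))
--
--     return solved_list
-- ===== SOURCE B (Python) =====
-- def find_equal_sums(d, c, other):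
--     # Subset-sum reformulation: an assignment works iff
--     # 2 * (sum of 'other' entries sent to c) == sum(d) - sum(c) + sum(other).
--     # Enumerate by recursion on 'other' with a shrinking target.
--     def rec(xs, t):
--         if not xs:
--             return [[]] if t == 0 else []
--         rest = xs[1:]
--         x = xs[0]
--         return [[0] + r for r in rec(rest, t)] + [[1] + r for r in rec(rest, t - 2 * x)]
--     return rec(other, sum(d) - sum(c) + sum(other))
-- ===== Notes on version B (the rewrite author's own statement) =====
-- stated objective: alternative
-- what changed: Replaced the full 2^n product enumeration with per-tuple re-summing by a target subset-sum recursion on 'other' that threads a single shrinking integer target, producing the same lists in the same lexicographic order.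
import Mathlib
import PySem

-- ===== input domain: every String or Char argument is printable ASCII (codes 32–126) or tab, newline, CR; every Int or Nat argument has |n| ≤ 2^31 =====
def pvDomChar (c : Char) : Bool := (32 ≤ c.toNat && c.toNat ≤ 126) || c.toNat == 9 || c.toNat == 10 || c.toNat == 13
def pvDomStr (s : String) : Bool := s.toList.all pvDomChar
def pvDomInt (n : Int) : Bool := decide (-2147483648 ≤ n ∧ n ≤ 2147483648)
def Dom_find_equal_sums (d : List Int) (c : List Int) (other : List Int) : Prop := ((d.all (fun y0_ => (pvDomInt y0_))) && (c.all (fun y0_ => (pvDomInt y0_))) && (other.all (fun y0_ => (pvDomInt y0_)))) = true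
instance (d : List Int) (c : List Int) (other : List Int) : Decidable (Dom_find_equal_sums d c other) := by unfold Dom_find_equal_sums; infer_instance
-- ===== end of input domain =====

-- B replaces A's full product enumeration plus per-tuple re-summing by a target
-- subset-sum recursion on `other` (alternative algorithm, same output order).

-- ===== PORT A =====
-- itertools.product([0,1], repeat=n), leftmost component varying slowest
def prodA : Nat → List (List Int)
  | 0 => [[]]
  | n + 1 => ([0, 1] : List Int).flatMap (fun b => (prodA n).map (fun i => b :: i))

-- the inner `for n, j in enumerate(i)` loop updating (ds2, cs2); other[n] is
-- always in range since i has length len(other), so `.getD 0` is never taken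
def loopA (other : List Int) : List (Int × Int) → Int × Int → Int × Int
  | [], p => p
  | (n, j) :: rest, p =>
      loopA other rest
        (if j = 0 then (p.1 + ((PySem.List.pyGet? other n).getD 0), p.2)
         else (p.1, p.2 + ((PySem.List.pyGet? other n).getD 0)))

-- the outer `for i in a:` loop appending solutions to solved_list
def outerA (other : List Int) (ds cs : Int) : List (List Int) → List (List Int)
  | [] => []
  | i :: rest =>
      let p := loopA other (PySem.List.enumerate i 0) (ds, cs)
      (if p.1 = p.2 then [i] else []) ++ outerA other ds cs rest

def find_equal_sums (d : List Int) (c : List Int) (other : List Int) : List (List Int) :=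
  outerA other d.sum c.sum (prodA other.length)

-- ===== PORT B =====
def recB : List Int → Int → List (List Int)
  | [], t => if t = 0 then [[]] else []
  | x :: rest, t =>
      ((recB rest t).map (fun r => 0 :: r)) ++ ((recB rest (t - 2 * x)).map (fun r => 1 :: r))

def find_equal_sums_alt (d : List Int) (c : List Int) (other : List Int) : List (List Int) :=
  recB other (d.sum - c.sum + other.sum)

-- ===== PRECONDITION & SPEC =====
def Spec_find_equal_sums (d : List Int) (c : List Int) (other : List Int) (out : List (List Int)) : Prop := out = find_equal_sums_alt d c other
instance (d : List Int) (c : List Int) (other : List Int) (out : List (List Int)) : Decidable (Spec_find_equal_sums d c other out) := by unfold Spec_find_equal_sums; infer_instance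

-- ===== CLAIM (what is proved, stated in full; the proofs are below) =====
def Claim_equal_find_equal_sums : Prop := ∀ (d : List Int) (c : List Int) (other : List Int), Dom_find_equal_sums d c other → Spec_find_equal_sums d c other (find_equal_sums d c other)

-- ===== LEMMAS AND PROOFS =====

-- shifting the enumerate start index by one while consing onto `other` is a no-op
lemma loopA_shift (x : Int) (other : List Int) :
    ∀ (i : List Int) (s : Nat) (p : Int × Int),
      loopA (x :: other) (PySem.List.enumerate i ((s : Int) + 1)) p
        = loopA other (PySem.List.enumerate i (s : Int)) p := by
  intro i
  induction i with
  | nil => intro s p; simp [PySem.List.enumerate_nil, loopA]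
  | cons a i ih =>
    intro s p
    rw [PySem.List.enumerate_cons, PySem.List.enumerate_cons, loopA, loopA]
    have hidx : PySem.List.pyGet? (x :: other) ((s : Int) + 1) = PySem.List.pyGet? other (s : Int) := by
      have : ((s : Int) + 1) = ((s + 1 : Nat) : Int) := by push_cast; ring
      rw [this]
      simp [PySem.List.pyGet?_natCast]
    rw [hidx]
    have h2 : ((s : Int) + 1 + 1) = (((s + 1 : Nat) : Int) + 1) := by push_cast; ring
    have h3 : ((s : Int) + 1) = ((s + 1 : Nat) : Int) := by push_cast; ring
    rw [h2]
    conv_rhs => rw [h3]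
    exact ih (s + 1) _

lemma outerA_append (other : List Int) (ds cs : Int) (l1 l2 : List (List Int)) :
    outerA other ds cs (l1 ++ l2) = outerA other ds cs l1 ++ outerA other ds cs l2 := by
  induction l1 with
  | nil => simp [outerA]
  | cons i rest ih => simp [outerA, ih]

-- outerA over a list of `b :: i'` candidates against `x :: rest` equals outerA over
-- the tails with the first step folded into the initial sums
lemma outerA_cons_map (x : Int) (rest : List Int) (ds cs b : Int) (L : List (List Int)) :
    outerA (x :: rest) ds cs (L.map (fun i => b :: i))
      = (outerA rest (if b = 0 then ds + x else ds) (if b = 0 then cs else cs + x) L).map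
          (fun i => b :: i) := by
  induction L with
  | nil => simp [outerA]
  | cons i L ih =>
    simp only [List.map_cons, outerA]
    rw [PySem.List.enumerate_cons]
    have h0 : PySem.List.pyGet? (x :: rest) (0 : Int) = some x := by
      have : (0 : Int) = ((0 : Nat) : Int) := rfl
      rw [this]; simp
    have hshift := loopA_shift x rest i 0
    rw [loopA, h0]
    by_cases hb : b = 0
    · rw [if_pos hb]; subst hb
      rw [show ((0 : Int) + 1) = (((0 : Nat) : Int) + 1) by norm_num, hshift, ih]
      simp [apply_ite (List.map (fun r => (0 : Int) :: r))]
    · rw [if_neg hb]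
      rw [show ((0 : Int) + 1) = (((0 : Nat) : Int) + 1) by norm_num, hshift, ih]
      simp [hb, apply_ite (List.map (fun r => b :: r))]

lemma main_lemma : ∀ (other : List Int) (ds cs : Int),
    outerA other ds cs (prodA other.length) = recB other (ds - cs + other.sum) := by
  intro other
  induction other with
  | nil =>
    intro ds cs
    simp only [List.length_nil, prodA, outerA, PySem.List.enumerate_nil, loopA, recB,
      List.sum_nil]
    by_cases h : ds = cs
    · rw [if_pos h, if_pos (by omega)]; rfl
    · rw [if_neg h, if_neg (by omega)]; rfl
  | cons x rest ih =>
    intro ds cs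
    have hp : prodA (x :: rest).length
        = ((prodA rest.length).map (fun i => (0 : Int) :: i))
          ++ ((prodA rest.length).map (fun i => (1 : Int) :: i)) := by
      simp [prodA, List.flatMap_cons]
    rw [hp, outerA_append, outerA_cons_map, outerA_cons_map]
    simp only [reduceIte, one_ne_zero]
    rw [ih (ds + x) cs, ih ds (cs + x)]
    rw [recB]
    congr 2
    · congr 1; simp [List.sum_cons]; ring
    · congr 1; simp [List.sum_cons]; ring

-- ===== VERDICT (by name: the statement is the Claim_ definition above) =====
theorem find_equal_sums_spec : Claim_equal_find_equal_sums := by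
  intro d c other _
  unfold Spec_find_equal_sums find_equal_sums find_equal_sums_alt
  exact main_lemma other d.sum c.sum
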